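-- pv_equiv track=rewrite | github.com/HariShankar08/Neural-POS-Tagging | pos_tagger.py | generate_windows_ffn
-- ===== SOURCE A (Python) =====
-- def generate_windows_ffn(sentence, p, s, vocabulary):
--     windows = []
--     for i in range(len(sentence)):
--         window = []
--         for j in range(1, p + 1):
--             if i - j < 0:
--                 window.insert(0, '<S>')
--             else:
--                 word = sentence[i-j]
--                 if vocabulary.get(word) is not None:
--                     window.insert(0, word)
--                 else:
--                     window.insert(0, '<UNK>')
--
--         if vocabulary.get(sentence[i]) is not None:
--             window.append(sentence[i])
--         else:
--             window.append('<UNK>')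
--
--         for j in range(1, s + 1):
--             if i + j >= len(sentence):
--                 window.append('</S>')
--             else:
--                 if vocabulary.get(sentence[i + j]) is not None:
--                     window.append(sentence[i + j])
--                 else:
--                     window.append('<UNK>')
--
--         windows.append(window)
--     return windows
-- ===== SOURCE B (Python) =====
-- def generate_windows_ffn(sentence, p, s, vocabulary):
--     # negative context sizes contribute nothing, exactly as A's empty ranges
--     p = max(p, 0)
--     s = max(s, 0)
--     mapped = [w if vocabulary.get(w) is not None else '<UNK>' for w in sentence]
--     padded = ['<S>'] * p + mapped + ['</S>'] * s
--     width = p + s + 1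
--     return [padded[i:i + width] for i in range(len(sentence))]
-- ===== Notes on version B (the rewrite author's own statement) =====
-- stated objective: simpler
-- what changed: Replaces A's per-token nested boundary-checking loops with insert(0,...) by one vocabulary-mapping pass, one padded array, and fixed-width slicing per position.
import Mathlib
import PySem

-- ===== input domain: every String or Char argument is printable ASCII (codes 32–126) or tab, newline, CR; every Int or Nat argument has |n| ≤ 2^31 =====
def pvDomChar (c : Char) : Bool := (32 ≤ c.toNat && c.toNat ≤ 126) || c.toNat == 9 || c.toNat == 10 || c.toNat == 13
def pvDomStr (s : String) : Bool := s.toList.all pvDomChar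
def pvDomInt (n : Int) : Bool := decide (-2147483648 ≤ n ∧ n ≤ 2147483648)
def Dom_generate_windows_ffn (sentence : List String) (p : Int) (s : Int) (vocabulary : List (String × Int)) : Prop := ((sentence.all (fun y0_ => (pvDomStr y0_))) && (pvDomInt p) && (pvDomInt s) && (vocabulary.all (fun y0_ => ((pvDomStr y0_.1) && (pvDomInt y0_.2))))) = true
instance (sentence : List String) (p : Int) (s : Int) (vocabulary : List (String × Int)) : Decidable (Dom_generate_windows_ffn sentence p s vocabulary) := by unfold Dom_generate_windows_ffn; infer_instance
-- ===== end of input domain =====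

-- B replaces A's per-token nested boundary-checking loops (with insert(0, ...)) by one
-- vocabulary-mapping pass, one padded array and fixed-width slicing (objective: simpler).

-- ===== PORT A =====
def generate_windows_ffn (sentence : List String) (p : Int) (s : Int) (vocabulary : List (String × Int)) : List (List String) :=
  (PySem.List.pyRange 0 (sentence.length : Int) 1).foldl (fun windows i =>
    -- for j in range(1, p+1): left context, window.insert(0, ...)
    let window : List String :=
      (PySem.List.pyRange 1 (p + 1) 1).foldl (fun window j =>
        if i - j < 0 then "<S>" :: window
        else
          let word := PySem.List.pyGetD sentence (i - j) ""   -- always in range: 0 ≤ i-j < len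
          if (PySem.Dict.get? (PySem.Dict.mk vocabulary) word).isSome then word :: window
          else "<UNK>" :: window) []
    -- the centre token sentence[i]
    let window : List String :=
      if (PySem.Dict.get? (PySem.Dict.mk vocabulary) (PySem.List.pyGetD sentence i "")).isSome then
        window ++ [PySem.List.pyGetD sentence i ""]
      else window ++ ["<UNK>"]
    -- for j in range(1, s+1): right context, window.append(...)
    let window : List String :=
      (PySem.List.pyRange 1 (s + 1) 1).foldl (fun window j =>
        if (sentence.length : Int) ≤ i + j then window ++ ["</S>"]
        else
          if (PySem.Dict.get? (PySem.Dict.mk vocabulary) (PySem.List.pyGetD sentence (i + j) "")).isSome then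
            window ++ [PySem.List.pyGetD sentence (i + j) ""]
          else window ++ ["<UNK>"]) window
    windows ++ [window]) []

-- ===== PORT B =====
def generate_windows_ffn_alt (sentence : List String) (p : Int) (s : Int) (vocabulary : List (String × Int)) : List (List String) :=
  let p' := max p 0
  let s' := max s 0
  let mapped := sentence.map (fun w => if (PySem.Dict.get? (PySem.Dict.mk vocabulary) w).isSome then w else "<UNK>")
  let padded := List.replicate p'.toNat "<S>" ++ mapped ++ List.replicate s'.toNat "</S>"
  let width := p' + s' + 1
  (PySem.List.pyRange 0 (sentence.length : Int) 1).map (fun i => PySem.List.slice padded (some i) (some (i + width)))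

-- ===== PRECONDITION & SPEC =====
def Spec_generate_windows_ffn (sentence : List String) (p : Int) (s : Int) (vocabulary : List (String × Int)) (out : List (List String)) : Prop := out = generate_windows_ffn_alt sentence p s vocabulary
instance (sentence : List String) (p : Int) (s : Int) (vocabulary : List (String × Int)) (out : List (List String)) : Decidable (Spec_generate_windows_ffn sentence p s vocabulary out) := by unfold Spec_generate_windows_ffn; infer_instance

-- ===== CLAIM (what is proved, stated in full; the proofs are below) =====
def Claim_equal_generate_windows_ffn : Prop := ∀ (sentence : List String) (p : Int) (s : Int) (vocabulary : List (String × Int)), Dom_generate_windows_ffn sentence p s vocabulary → Spec_generate_windows_ffn sentence p s vocabulary (generate_windows_ffn sentence p s vocabulary)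

-- ===== LEMMAS AND PROOFS =====

-- a fold that prepends f x is the reversed map
theorem pv_foldl_cons_rev {α β : Type} (xs : List α) (f : α → β) (acc : List β) :
    xs.foldl (fun a x => f x :: a) acc = (xs.map f).reverse ++ acc := by
  induction xs generalizing acc with
  | nil => simp
  | cons x xs ih => simp [List.foldl_cons, ih]

-- push a branch on what is appended out of the if
theorem pv_ite_append {α : Type} (c : Prop) [Decidable c] (A : List α) (a b : α) :
    (if c then A ++ [a] else A ++ [b]) = A ++ [if c then a else b] := by
  split_ifs <;> rfl

-- the window A builds at position ii is exactly the fixed-width slice of B's padded array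
set_option maxHeartbeats 1000000 in
theorem pv_window_eq (sentence : List String) (p s : Int) (vocabulary : List (String × Int)) (ii : Nat)
    (hlt : ii < sentence.length) :
    (let window : List String :=
        (PySem.List.pyRange 1 (p + 1) 1).foldl (fun window j =>
          if (ii:Int) - j < 0 then "<S>" :: window
          else
            let word := PySem.List.pyGetD sentence ((ii:Int) - j) ""
            if (PySem.Dict.get? (PySem.Dict.mk vocabulary) word).isSome then word :: window
            else "<UNK>" :: window) []
      let window : List String :=
        if (PySem.Dict.get? (PySem.Dict.mk vocabulary) (PySem.List.pyGetD sentence (ii:Int) "")).isSome then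
          window ++ [PySem.List.pyGetD sentence (ii:Int) ""]
        else window ++ ["<UNK>"]
      let window : List String :=
        (PySem.List.pyRange 1 (s + 1) 1).foldl (fun window j =>
          if (sentence.length : Int) ≤ (ii:Int) + j then window ++ ["</S>"]
          else
            if (PySem.Dict.get? (PySem.Dict.mk vocabulary) (PySem.List.pyGetD sentence ((ii:Int) + j) "")).isSome then
              window ++ [PySem.List.pyGetD sentence ((ii:Int) + j) ""]
            else window ++ ["<UNK>"]) window
      window) =
    PySem.List.slice (List.replicate (max p 0).toNat "<S>" ++ sentence.map (fun w => if (PySem.Dict.get? (PySem.Dict.mk vocabulary) w).isSome then w else "<UNK>") ++ List.replicate (max s 0).toNat "</S>") (some (ii:Int)) (some ((ii:Int) + (max p 0 + max s 0 + 1))) := by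
  have hL : (fun (window : List String) (j : Int) =>
          if (ii:Int) - j < 0 then "<S>" :: window
          else
            let word := PySem.List.pyGetD sentence ((ii:Int) - j) ""
            if (PySem.Dict.get? (PySem.Dict.mk vocabulary) word).isSome then word :: window
            else "<UNK>" :: window)
      = (fun window j => (if (ii:Int) - j < 0 then "<S>"
          else if (PySem.Dict.get? (PySem.Dict.mk vocabulary) (PySem.List.pyGetD sentence ((ii:Int) - j) "")).isSome
          then PySem.List.pyGetD sentence ((ii:Int) - j) "" else "<UNK>") :: window) := by
    funext w j; simp only []; split_ifs <;> rfl
  simp only [hL, pv_foldl_cons_rev, pv_ite_append, PySem.List.foldl_append_singleton_eq_map,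
    PySem.List.pyRange_one, add_sub_cancel_right, List.map_map, List.append_nil]
  rw [PySem.List.slice_toNat _ (a := (ii:Int)) (b := (ii:Int) + (max p 0 + max s 0 + 1)) (by omega) (by omega)]
  rw [show (max p 0).toNat = p.toNat from by omega, show (max s 0).toNat = s.toNat from by omega]
  simp only [Int.toNat_natCast]
  rw [show ((ii:Int) + (max p 0 + max s 0 + 1)).toNat - ii = p.toNat + s.toNat + 1 from by omega]
  apply List.ext_getElem
  · simp; omega
  · intro t h1 h2
    simp only [List.getElem_append, List.getElem_take, List.getElem_drop, List.getElem_reverse,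
      List.getElem_map, List.getElem_range, List.length_reverse, List.length_map, List.length_range,
      List.length_append, List.length_replicate,
      List.getElem_replicate, Function.comp, List.length_cons, List.length_nil]
    split_ifs <;> try rfl
    all_goals try omega
    all_goals try (
      have e : PySem.List.pyGetD sentence ((ii:Int) - (1 + ((p.toNat - 1 - t : Nat) : Int))) "" = sentence[ii + t - p.toNat]'(by omega) := by
        rw [PySem.List.pyGetD_eq_getElem _ "" (by omega) (by omega)]
        exact getElem_congr rfl (by omega) (by omega)
      simp only [e] at *)
    all_goals try (
      have e : PySem.List.pyGetD sentence ((ii:Int) + (1 + ((t - (p.toNat + (0+1)) : Nat) : Int))) "" = sentence[ii + t - p.toNat]'(by omega) := by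
        rw [PySem.List.pyGetD_eq_getElem _ "" (by omega) (by omega)]
        exact getElem_congr rfl (by omega) (by omega)
      simp only [e] at *)
    all_goals try (
      have e : PySem.List.pyGetD sentence ((ii:Nat) : Int) "" = sentence[ii + t - p.toNat]'(by omega) := by
        rw [PySem.List.pyGetD_eq_getElem _ "" (by omega) (by omega)]
        exact getElem_congr rfl (by omega) (by omega)
      simp only [e] at *)
    all_goals try first | rfl | simp_all
    all_goals (rw [dif_pos (by omega), dif_neg (by omega : ¬((ii:Int) + (t:Int) < p))]; simp_all)
    all_goals (intro hsome; simp only [show ii + t - p.toNat = ii from by omega] at hsome; simp_all)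

-- ===== VERDICT (by name: the statement is the Claim_ definition above) =====
theorem generate_windows_ffn_spec : Claim_equal_generate_windows_ffn := by
  intro sentence p s vocabulary _
  unfold Spec_generate_windows_ffn generate_windows_ffn generate_windows_ffn_alt
  rw [PySem.List.foldl_append_singleton_eq_map]
  simp only [List.nil_append]
  refine List.map_congr_left ?_
  intro i hi
  rw [PySem.List.mem_pyRange_one] at hi
  obtain ⟨h0, hlt⟩ := hi
  lift i to Nat using h0 with ii
  exact pv_window_eq sentence p s vocabulary ii (by exact_mod_cast hlt)
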